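-- pv_equiv track=rewrite | github.com/bbo-lab/videoreader | svidreader/filtergraph.py | find_ignore_escaped
-- ===== SOURCE A (Python) =====
-- def find_ignore_escaped(str, tofind):
--     single_quotes = False
--     double_quotes = False
--     escaped = False
--
--     for i in range(len(str)):
--         char = str[i]
--         if single_quotes:
--             if char == "'":
--                 single_quotes = False
--             continue
--         if double_quotes:
--             if char == '"':
--                 double_quotes = False
--             continue
--         if escaped:
--             escaped = False
--             continue
--         if char == '\\':
--             escaped = True
--             continue
--         if char == "'":
--             single_quotes = True
--             continue
--         if char == '"':
--             double_quotes = True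
--             continue
--         if char == tofind:
--             return i
--     return -1
-- ===== SOURCE B (Python) =====
-- def find_ignore_escaped(str, tofind):
--     i = 0
--     n = len(str)
--     while i < n:
--         c = str[i]
--         if c == "'" or c == '"':
--             # skip the quoted region: advance to the matching closing quote
--             i += 1
--             while i < n and str[i] != c:
--                 i += 1
--             i += 1  # step past the closing quote (or past the end if unterminated)
--         elif c == '\\':
--             i += 2  # skip the backslash and the escaped character
--         elif c == tofind:
--             return i
--         else:
--             i += 1
--     return -1
-- ===== Notes on version B (the rewrite author's own statement) =====
-- stated objective: alternative
-- what changed: Replaces A's single for-loop with three boolean state flags (single_quotes/double_quotes/escaped) by an explicit index while-loop with no state flags: a quoted region is consumed by a dedicated inner scan to the matching quote, and an escape is consumed by jumping two positions.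
import Mathlib
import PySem

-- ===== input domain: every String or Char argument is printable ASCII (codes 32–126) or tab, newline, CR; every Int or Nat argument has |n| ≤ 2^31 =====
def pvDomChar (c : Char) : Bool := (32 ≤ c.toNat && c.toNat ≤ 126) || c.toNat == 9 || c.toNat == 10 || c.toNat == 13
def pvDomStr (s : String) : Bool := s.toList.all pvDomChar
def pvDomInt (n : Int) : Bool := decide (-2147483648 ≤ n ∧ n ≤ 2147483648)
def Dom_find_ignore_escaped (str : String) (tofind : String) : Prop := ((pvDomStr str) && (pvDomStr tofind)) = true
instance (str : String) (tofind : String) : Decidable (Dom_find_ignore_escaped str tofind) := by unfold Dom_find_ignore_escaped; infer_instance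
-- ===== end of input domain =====

-- B replaces A's state-flag loop by an index loop with a dedicated inner scan over quoted
-- regions and a two-step jump over escapes (alternative decomposition, same cost).

-- ===== PORT A =====
-- literal port of A's for-loop: state (single_quotes, double_quotes, escaped), index i
def pvGoA (tofind : String) : List Char → Int → Bool → Bool → Bool → Int
  | [], _, _, _, _ => -1
  | c :: rest, i, sq, dq, esc =>
    if sq then
      (if c = '\'' then pvGoA tofind rest (i+1) false dq esc
       else pvGoA tofind rest (i+1) sq dq esc)
    else if dq then
      (if c = '"' then pvGoA tofind rest (i+1) sq false esc
       else pvGoA tofind rest (i+1) sq dq esc)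
    else if esc then pvGoA tofind rest (i+1) sq dq false
    else if c = '\\' then pvGoA tofind rest (i+1) sq dq true
    else if c = '\'' then pvGoA tofind rest (i+1) true dq esc
    else if c = '"' then pvGoA tofind rest (i+1) sq true esc
    else if String.mk [c] = tofind then i
    else pvGoA tofind rest (i+1) sq dq esc

def find_ignore_escaped (str : String) (tofind : String) : Int :=
  pvGoA tofind str.toList 0 false false false

-- ===== PORT B =====
-- inner while loop of B: scan forward to the matching closing quote q, return the
-- remaining characters after it and the index just past it
def pvSkip (q : Char) : List Char → Int → (List Char × Int)
  | [], i => ([], i)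
  | c :: rest, i => if c = q then (rest, i+1) else pvSkip q rest (i+1)

theorem pvSkip_len (q : Char) : ∀ (l : List Char) (i : Int), (pvSkip q l i).1.length ≤ l.length := by
  intro l
  induction l with
  | nil => intro i; simp [pvSkip]
  | cons c rest ih =>
    intro i
    by_cases h : c = q
    · simp [pvSkip, h]
    · simp only [pvSkip, if_neg h]
      exact Nat.le_trans (ih (i+1)) (Nat.le_succ _)

def pvGoB (tofind : String) : List Char → Int → Int
  | [], _ => -1
  | c :: rest, i =>
    if c = '\'' ∨ c = '"' then
      let p := pvSkip c rest (i+1)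
      pvGoB tofind p.1 p.2
    else if c = '\\' then
      match rest with
      | [] => -1
      | _ :: r2 => pvGoB tofind r2 (i+2)
    else if String.mk [c] = tofind then i
    else pvGoB tofind rest (i+1)
termination_by l => l.length
decreasing_by
  · exact Nat.lt_succ_of_le (pvSkip_len c rest (i+1))
  · simp
  · simp

def find_ignore_escaped_alt (str : String) (tofind : String) : Int :=
  pvGoB tofind str.toList 0

-- ===== PRECONDITION & SPEC =====
def Spec_find_ignore_escaped (str : String) (tofind : String) (out : Int) : Prop := out = find_ignore_escaped_alt str tofind
instance (str : String) (tofind : String) (out : Int) : Decidable (Spec_find_ignore_escaped str tofind out) := by unfold Spec_find_ignore_escaped; infer_instance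

-- ===== CLAIM (what is proved, stated in full; the proofs are below) =====
def Claim_equal_find_ignore_escaped : Prop := ∀ (str : String) (tofind : String), Dom_find_ignore_escaped str tofind → Spec_find_ignore_escaped str tofind (find_ignore_escaped str tofind)

-- ===== LEMMAS AND PROOFS =====

-- A in the single-quote state scans exactly like pvSkip '\''
theorem pvGoA_sq (tofind : String) : ∀ (l : List Char) (i : Int),
    pvGoA tofind l i true false false
      = pvGoA tofind (pvSkip '\'' l i).1 (pvSkip '\'' l i).2 false false false := by
  intro l
  induction l with
  | nil => intro i; simp [pvGoA, pvSkip]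
  | cons c rest ih =>
    intro i
    by_cases h : c = '\''
    · simp [pvGoA, pvSkip, h]
    · simp only [pvGoA, pvSkip, if_neg h]
      exact ih (i+1)

-- A in the double-quote state scans exactly like pvSkip '"'
theorem pvGoA_dq (tofind : String) : ∀ (l : List Char) (i : Int),
    pvGoA tofind l i false true false
      = pvGoA tofind (pvSkip '"' l i).1 (pvSkip '"' l i).2 false false false := by
  intro l
  induction l with
  | nil => intro i; simp [pvGoA, pvSkip]
  | cons c rest ih =>
    intro i
    by_cases h : c = '"'
    · simp [pvGoA, pvSkip, h]
    · simp only [pvGoA, pvSkip, if_neg h]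
      simp only [Bool.false_eq_true, if_false]
      exact ih (i+1)

-- A in the escaped state consumes exactly one character without comparing it
theorem pvGoA_esc (tofind : String) (l : List Char) (i : Int) :
    pvGoA tofind l i false false true
      = match l with
        | [] => (-1 : Int)
        | _ :: r => pvGoA tofind r (i+1) false false false := by
  cases l with
  | nil => simp [pvGoA]
  | cons c rest => simp [pvGoA]

theorem pvGo_eq (tofind : String) : ∀ (n : Nat) (l : List Char), l.length ≤ n → ∀ (i : Int),
    pvGoA tofind l i false false false = pvGoB tofind l i := by
  intro n
  induction n with
  | zero =>
    intro l h i
    have hl : l = [] := List.eq_nil_of_length_eq_zero (Nat.le_zero.mp h)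
    subst hl; simp [pvGoA, pvGoB]
  | succ n ih =>
    intro l h i
    cases l with
    | nil => simp [pvGoA, pvGoB]
    | cons c rest =>
      have hrest : rest.length ≤ n := Nat.lt_succ_iff.mp h
      by_cases h1 : c = '\''
      · subst h1
        rw [show pvGoA tofind ('\'' :: rest) i false false false
              = pvGoA tofind rest (i+1) true false false by simp [pvGoA]]
        rw [pvGoA_sq]
        rw [show pvGoB tofind ('\'' :: rest) i
              = pvGoB tofind (pvSkip '\'' rest (i+1)).1 (pvSkip '\'' rest (i+1)).2 by
            rw [pvGoB.eq_def]; simp]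
        exact ih _ (Nat.le_trans (pvSkip_len _ _ _) hrest) _
      · by_cases h2 : c = '"'
        · subst h2
          rw [show pvGoA tofind ('"' :: rest) i false false false
                = pvGoA tofind rest (i+1) false true false by simp [pvGoA]]
          rw [pvGoA_dq]
          rw [show pvGoB tofind ('"' :: rest) i
                = pvGoB tofind (pvSkip '"' rest (i+1)).1 (pvSkip '"' rest (i+1)).2 by
              rw [pvGoB.eq_def]; simp]
          exact ih _ (Nat.le_trans (pvSkip_len _ _ _) hrest) _
        · by_cases h3 : c = '\\'
          · subst h3
            rw [show pvGoA tofind ('\\' :: rest) i false false false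
                  = pvGoA tofind rest (i+1) false false true by simp [pvGoA]]
            rw [pvGoA_esc]
            cases rest with
            | nil => rw [show pvGoB tofind ['\\'] i = -1 by rw [pvGoB.eq_def]; simp]
            | cons c2 r2 =>
              rw [show pvGoB tofind ('\\' :: c2 :: r2) i = pvGoB tofind r2 (i+2) by
                    rw [pvGoB.eq_def]; simp]
              simp only []
              rw [show i + 1 + 1 = i + 2 by ring]
              exact ih r2 (Nat.le_trans (Nat.le_succ _) (Nat.lt_succ_iff.mp h)) (i+2)
          · rw [show pvGoA tofind (c :: rest) i false false false
                  = (if String.mk [c] = tofind then i else pvGoA tofind rest (i+1) false false false)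
                by simp [pvGoA, h1, h2, h3]]
            rw [show pvGoB tofind (c :: rest) i
                  = (if String.mk [c] = tofind then i else pvGoB tofind rest (i+1))
                by rw [pvGoB.eq_def]; simp [h1, h2, h3]]
            by_cases h4 : String.mk [c] = tofind
            · simp [h4]
            · simp only [if_neg h4]
              exact ih rest hrest (i+1)

-- ===== VERDICT (by name: the statement is the Claim_ definition above) =====
theorem find_ignore_escaped_spec : Claim_equal_find_ignore_escaped := by
  intro str tofind _
  unfold Spec_find_ignore_escaped find_ignore_escaped find_ignore_escaped_alt
  exact pvGo_eq tofind str.toList.length str.toList (Nat.le_refl _) 0
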